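-- pv_equiv track=rewrite | github.com/aphymi/advent-of-code | y2022/day15.py | get_free_x
-- ===== SOURCE A (Python) =====
-- from typing import Optional
--
-- def get_free_x(
-- 	ranges: list[tuple[int, int]],
-- 	bounds: tuple[int, int],
-- ) -> Optional[int]:
-- 	# assumes there is most a single uncovered space
-- 	furthest_end = None
--
-- 	for start, end in sorted(ranges):
-- 		if furthest_end is None:
-- 			if start > bounds[0]:
-- 				return bounds[0]
--
-- 			furthest_end = end
-- 			continue
--
-- 		if start > (furthest_end + 1):
-- 			return start - 1
--
-- 		if end > furthest_end:
-- 			furthest_end = end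
--
-- 	if furthest_end < bounds[1]:
-- 		return bounds[1]
--
-- 	return None
-- ===== SOURCE B (Python) =====
-- def get_free_x(ranges, bounds):
--     # merge sorted ranges into maximal disjoint intervals, then scan once
--     merged = []
--     for s, e in sorted(ranges):
--         if merged and s <= merged[-1][1] + 1:
--             merged[-1][1] = max(merged[-1][1], e)
--         else:
--             merged.append([s, e])
--     if not merged or merged[0][0] > bounds[0]:
--         return bounds[0]
--     prev_end = merged[0][1]
--     for s, e in merged[1:]:
--         if s > prev_end + 1:
--             return s - 1
--         prev_end = e
--     if prev_end < bounds[1]: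
--         return bounds[1]
--     return None
-- ===== Notes on version B (the rewrite author's own statement) =====
-- stated objective: alternative
-- what changed: B first merges the sorted ranges into maximal disjoint intervals and then scans the merged list once for the gap, instead of A's single fused loop carrying furthest_end with early returns.
import Mathlib
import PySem

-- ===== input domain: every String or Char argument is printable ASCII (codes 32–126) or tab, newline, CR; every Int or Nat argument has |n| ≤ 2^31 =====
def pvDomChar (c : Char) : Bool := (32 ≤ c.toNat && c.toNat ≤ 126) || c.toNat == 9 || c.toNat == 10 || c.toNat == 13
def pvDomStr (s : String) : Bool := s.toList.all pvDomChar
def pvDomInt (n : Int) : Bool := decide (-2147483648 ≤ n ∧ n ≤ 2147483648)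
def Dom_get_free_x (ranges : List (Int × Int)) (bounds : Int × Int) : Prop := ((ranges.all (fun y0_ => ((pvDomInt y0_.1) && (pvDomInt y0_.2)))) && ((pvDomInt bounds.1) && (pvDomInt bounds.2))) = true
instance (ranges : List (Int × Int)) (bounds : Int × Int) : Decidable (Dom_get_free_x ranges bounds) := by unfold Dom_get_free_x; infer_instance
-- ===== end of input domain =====

-- B merges the sorted ranges into maximal disjoint intervals first and then scans the
-- merged list once for the single gap (different decomposition; no speed claim).

-- ===== PORT A =====
-- the loop of A after the first sorted range has set furthest_end := its end
def pvGoA (bounds : Int × Int) (fe : Int) : List (Int × Int) → Option Int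
  | [] => if fe < bounds.2 then some bounds.2 else none
  | (s, e) :: rest =>
    if s > fe + 1 then some (s - 1)
    else pvGoA bounds (if e > fe then e else fe) rest

def get_free_x (ranges : List (Int × Int)) (bounds : Int × Int) : Option Int :=
  match PySem.List.sorted2 ranges Prod.fst Prod.snd with
  | [] => none   -- Python raises TypeError here (None < int); excluded by Pre_get_free_x
  | (s, e) :: rest => if s > bounds.1 then some bounds.1 else pvGoA bounds e rest

-- ===== PORT B =====
-- Source B's merge loop: current open interval (cs, ce), extend or emit-and-restart
def pvMergeGo (cs ce : Int) : List (Int × Int) → List (Int × Int)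
  | [] => [(cs, ce)]
  | (s, e) :: rest =>
    if s ≤ ce + 1 then pvMergeGo cs (max ce e) rest
    else (cs, ce) :: pvMergeGo s e rest

def pvMerged (xs : List (Int × Int)) : List (Int × Int) :=
  match xs with
  | [] => []
  | (s, e) :: rest => pvMergeGo s e rest

-- Source B's scan over merged[1:] with prev_end
def pvScanGo (bounds : Int × Int) (pe : Int) : List (Int × Int) → Option Int
  | [] => if pe < bounds.2 then some bounds.2 else none
  | (s, e) :: rest => if s > pe + 1 then some (s - 1) else pvScanGo bounds e rest

def get_free_x_alt (ranges : List (Int × Int)) (bounds : Int × Int) : Option Int :=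
  match pvMerged (PySem.List.sorted2 ranges Prod.fst Prod.snd) with
  | [] => some bounds.1
  | (s, e) :: rest => if s > bounds.1 then some bounds.1 else pvScanGo bounds e rest

-- ===== PRECONDITION & SPEC =====
-- Pre_ excludes only the empty list of ranges, on which A raises TypeError (None < int).
def Pre_get_free_x (ranges : List (Int × Int)) (bounds : Int × Int) : Prop := ranges ≠ []
instance (ranges : List (Int × Int)) (bounds : Int × Int) : Decidable (Pre_get_free_x ranges bounds) := by unfold Pre_get_free_x; infer_instance
def pvWitness_get_free_x : (List (Int × Int)) × (Int × Int) := ([(0, 0)], (0, 5))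

def Spec_get_free_x (ranges : List (Int × Int)) (bounds : Int × Int) (out : Option Int) : Prop := out = get_free_x_alt ranges bounds
instance (ranges : List (Int × Int)) (bounds : Int × Int) (out : Option Int) : Decidable (Spec_get_free_x ranges bounds out) := by unfold Spec_get_free_x; infer_instance

-- ===== CLAIM (what is proved, stated in full; the proofs are below) =====
def Claim_equal_get_free_x : Prop := ∀ (ranges : List (Int × Int)) (bounds : Int × Int), Dom_get_free_x ranges bounds → Pre_get_free_x ranges bounds → Spec_get_free_x ranges bounds (get_free_x ranges bounds)

-- ===== LEMMAS AND PROOFS =====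

-- merge-then-scan on a tail equals A's direct loop; the merged head keeps start cs
theorem pvMerge_scan (bounds : Int × Int) :
    ∀ (rest : List (Int × Int)) (cs ce : Int),
      ∃ e' t, pvMergeGo cs ce rest = (cs, e') :: t ∧
        pvScanGo bounds e' t = pvGoA bounds ce rest := by
  intro rest
  induction rest with
  | nil =>
    intro cs ce
    exact ⟨ce, [], rfl, rfl⟩
  | cons p r ih =>
    intro cs ce
    obtain ⟨s, e⟩ := p
    by_cases h : s ≤ ce + 1
    · obtain ⟨e', t, h1, h2⟩ := ih cs (max ce e)
      refine ⟨e', t, ?_, ?_⟩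
      · simp [pvMergeGo, h, h1]
      · rw [h2]
        have : (if e > ce then e else ce) = max ce e := by
          split <;> omega
        simp [pvGoA, show ¬ s > ce + 1 by omega, this]
    · obtain ⟨e', t, h1, h2⟩ := ih s e
      refine ⟨ce, pvMergeGo s e r, ?_, ?_⟩
      · simp [pvMergeGo, h]
      · rw [h1]
        simp [pvScanGo, pvGoA, show s > ce + 1 by omega]

theorem pv_main : ∀ (ranges : List (Int × Int)) (bounds : Int × Int),
    ranges ≠ [] → get_free_x ranges bounds = get_free_x_alt ranges bounds := by
  intro ranges bounds hne
  have hperm := PySem.List.sorted2_perm (xs := ranges) (k1 := Prod.fst) (k2 := Prod.snd) (rev := false)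
  cases hs : PySem.List.sorted2 ranges Prod.fst Prod.snd with
  | nil =>
    exact absurd (List.Perm.eq_nil (hs ▸ hperm).symm) hne
  | cons p rest =>
    obtain ⟨s, e⟩ := p
    obtain ⟨e', t, h1, h2⟩ := pvMerge_scan bounds rest s e
    simp [get_free_x, get_free_x_alt, hs, pvMerged, h1, h2]

-- ===== VERDICT (by name: the statement is the Claim_ definition above) =====
theorem get_free_x_spec : Claim_equal_get_free_x := by
  intro ranges bounds _ hpre
  exact pv_main ranges bounds hpre
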